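-- pv_equiv track=rewrite | github.com/s-fraresso/Project_Euler | src/500-599/problem549.py | sieve_prime_factorizations
-- ===== SOURCE A (Python) =====
-- def sieve_prime_factorizations(n):
--     # Create a list to store the prime factorizations
--     factors = [None] * (n + 1)
--
--     # For each number, if it's still marked None, it's a prime
--     for i in range(2, n + 1):
--         if factors[i] is None:  # i is prime
--             factors[i] = {i: 1}  # The prime factorization of a prime is {prime: 1}
--             for j in range(2 * i, n + 1, i):
--                 if factors[j] is None:
--                     factors[j] = {}
--                 # Count the power of prime i in j
--                 count = 0
--                 num = j
--                 while num % i == 0: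
--                     num //= i
--                     count += 1
--                 if i in factors[j]:
--                     factors[j][i] += count
--                 else:
--                     factors[j][i] = count
--     return factors
-- ===== SOURCE B (Python) =====
-- def sieve_prime_factorizations(n):
--     # Smallest-prime-factor sieve, then factor each k by repeated division.
--     spf = [0] * (n + 1)
--     for i in range(2, n + 1):
--         if spf[i] == 0:
--             for j in range(i, n + 1, i):
--                 if spf[j] == 0:
--                     spf[j] = i
--     result = [None] * (n + 1)
--     for k in range(2, n + 1):
--         f = {}
--         m = k
--         while m > 1:
--             p = spf[m]
--             e = 0
--             while m % p == 0:
--                 m //= p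
--                 e += 1
--             f[p] = e
--         result[k] = f
--     return result
-- ===== Notes on version B (the rewrite author's own statement) =====
-- stated objective: alternative
-- what changed: Replaces the per-prime multiple sieve that builds every factor dict incrementally with a smallest-prime-factor sieve followed by per-number repeated division into a fresh dict.
import Mathlib
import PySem

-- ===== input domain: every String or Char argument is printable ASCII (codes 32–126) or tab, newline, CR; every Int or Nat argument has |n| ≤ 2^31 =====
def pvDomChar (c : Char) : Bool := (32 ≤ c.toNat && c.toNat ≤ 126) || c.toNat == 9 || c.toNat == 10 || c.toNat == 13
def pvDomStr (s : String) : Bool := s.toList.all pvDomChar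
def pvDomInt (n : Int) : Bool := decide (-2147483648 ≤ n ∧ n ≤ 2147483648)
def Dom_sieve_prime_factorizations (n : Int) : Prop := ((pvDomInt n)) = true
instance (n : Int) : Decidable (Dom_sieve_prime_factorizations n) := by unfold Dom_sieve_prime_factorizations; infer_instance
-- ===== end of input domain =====

-- B replaces A's per-prime multiple sieve (which grows each factor dict in place) by a
-- smallest-prime-factor sieve followed by per-number repeated division (objective: alternative).

-- ===== PORT A =====

-- while num % i == 0: num //= i; count += 1   (the guard only makes the recursion total;
-- every reachable call has 2 ≤ i and 1 ≤ num)
def pvCountDiv (i num : Int) : Int :=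
  if h : 2 ≤ i ∧ 1 ≤ num then
    if PySem.Int.mod num i = 0 then pvCountDiv i (PySem.Int.floordiv num i) + 1 else 0
  else 0
termination_by num.toNat
decreasing_by
  have h2 : PySem.Int.floordiv num i = num / i := PySem.Int.floordiv_eq_ediv_of_pos (by omega)
  have h3 : num / i < num := by
    rw [Int.ediv_lt_iff_lt_mul (by omega)]
    nlinarith
  have h4 : 0 ≤ num / i := Int.ediv_nonneg (by omega) (by omega)
  simp only [h2]; omega

-- body of A's inner loop over j in range(2*i, n+1, i)
def pvInnerA (i : Int) (factors : List (Option (PySem.Dict Int Int))) (j : Int) :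
    List (Option (PySem.Dict Int Int)) :=
  let factors :=
    match PySem.List.pyGetD factors j none with
    | none => PySem.List.pySetD factors j (some PySem.Dict.empty)
    | some _ => factors
  let count := pvCountDiv i j
  let d := (PySem.List.pyGetD factors j none).getD PySem.Dict.empty
  let d' :=
    match d.get? i with
    | some v => d.insert i (v + count)
    | none => d.insert i count
  PySem.List.pySetD factors j (some d')

-- body of A's outer loop over i in range(2, n+1)
def pvStepA (n : Int) (factors : List (Option (PySem.Dict Int Int))) (i : Int) :
    List (Option (PySem.Dict Int Int)) :=
  match PySem.List.pyGetD factors i none with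
  | some _ => factors
  | none =>
    let factors := PySem.List.pySetD factors i (some (PySem.Dict.empty.insert i 1))
    (PySem.List.pyRange (2 * i) (n + 1) i).foldl (pvInnerA i) factors

def sieve_prime_factorizations (n : Int) : List (Option (List (Int × Int))) :=
  let factors : List (Option (PySem.Dict Int Int)) := PySem.List.pyRepeat [none] (n + 1)
  let factors := (PySem.List.pyRange 2 (n + 1) 1).foldl (pvStepA n) factors
  factors.map (Option.map PySem.Dict.items)

-- ===== PORT B =====

-- while m % p == 0: m //= p; e += 1   — returns (e, final m); guard is for totality only
def pvStrip (p m : Int) : Int × Int :=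
  if h : 2 ≤ p ∧ 1 ≤ m then
    if PySem.Int.mod m p = 0 then
      let r := pvStrip p (PySem.Int.floordiv m p)
      (r.1 + 1, r.2)
    else (0, m)
  else (0, m)
termination_by m.toNat
decreasing_by
  have h2 : PySem.Int.floordiv m p = m / p := PySem.Int.floordiv_eq_ediv_of_pos (by omega)
  have h3 : m / p < m := by
    rw [Int.ediv_lt_iff_lt_mul (by omega)]
    nlinarith
  have h4 : 0 ≤ m / p := Int.ediv_nonneg (by omega) (by omega)
  simp only [h2]; omega

-- while m > 1: p = spf[m]; strip p; f[p] = e   — the bound check only makes the recursion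
-- total; every reachable call strictly decreases m
def pvChain (spf : List Int) (m : Int) (f : PySem.Dict Int Int) : PySem.Dict Int Int :=
  if h1 : 1 < m then
    if h2 : 0 ≤ (pvStrip (PySem.List.pyGetD spf m 0) m).2 ∧ (pvStrip (PySem.List.pyGetD spf m 0) m).2 < m then
      pvChain spf (pvStrip (PySem.List.pyGetD spf m 0) m).2
        (f.insert (PySem.List.pyGetD spf m 0) (pvStrip (PySem.List.pyGetD spf m 0) m).1)
    else f.insert (PySem.List.pyGetD spf m 0) (pvStrip (PySem.List.pyGetD spf m 0) m).1
  else f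
termination_by m.toNat
decreasing_by omega

-- body of B's inner sieve loop over j in range(i, n+1, i)
def pvInnerS (spf : List Int) (j i : Int) : List Int :=
  if PySem.List.pyGetD spf j 0 = 0 then PySem.List.pySetD spf j i else spf

-- body of B's outer sieve loop over i in range(2, n+1)
def pvStepS (n : Int) (spf : List Int) (i : Int) : List Int :=
  if PySem.List.pyGetD spf i 0 = 0 then
    (PySem.List.pyRange i (n + 1) i).foldl (fun spf j => pvInnerS spf j i) spf
  else spf

def sieve_prime_factorizations_alt (n : Int) : List (Option (List (Int × Int))) :=
  let spf : List Int := PySem.List.pyRepeat [0] (n + 1)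
  let spf := (PySem.List.pyRange 2 (n + 1) 1).foldl (pvStepS n) spf
  let result : List (Option (PySem.Dict Int Int)) := PySem.List.pyRepeat [none] (n + 1)
  let result := (PySem.List.pyRange 2 (n + 1) 1).foldl
    (fun res k => PySem.List.pySetD res k (some (pvChain spf k PySem.Dict.empty))) result
  result.map (Option.map PySem.Dict.items)

-- ===== PRECONDITION & SPEC =====
def Spec_sieve_prime_factorizations (n : Int) (out : List (Option (List (Int × Int)))) : Prop := out = sieve_prime_factorizations_alt n
instance (n : Int) (out : List (Option (List (Int × Int)))) : Decidable (Spec_sieve_prime_factorizations n out) := by unfold Spec_sieve_prime_factorizations; infer_instance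

-- ===== CLAIM (what is proved, stated in full; the proofs are below) =====
def Claim_equal_sieve_prime_factorizations : Prop := ∀ (n : Int), Dom_sieve_prime_factorizations n → Spec_sieve_prime_factorizations n (sieve_prime_factorizations n)

-- ===== LEMMAS AND PROOFS =====

-- least (necessarily prime) factor of k, as an Int
def pvL (k : Int) : Int := (k.toNat.minFac : Int)

-- the canonical factor list: primes p ∈ [2, n] dividing k, with their multiplicities in k
def pvF (n k : Int) : List (Int × Int) :=
  (PySem.List.pyRange 2 (n + 1) 1).filterMap
    (fun p => if 2 ≤ p ∧ p.toNat.Prime ∧ p ∣ k then some (p, pvCountDiv p k) else none)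

-- a length-N table indexed by Int
def pvTab {α : Type} (N : Nat) (F : Int → α) : List α := (List.range N).map (fun t : Nat => F (t : Int))

-- ---- integer prime basics ----
def pvPrime (p : Int) : Prop := 2 ≤ p ∧ p.toNat.Prime

lemma pvDvd_toNat {a b : Int} (ha : 0 ≤ a) (hb : 0 ≤ b) : a ∣ b ↔ a.toNat ∣ b.toNat := by
  rw [← Int.natCast_dvd_natCast, Int.toNat_of_nonneg ha, Int.toNat_of_nonneg hb]

lemma pvPrime_int {p : Int} (h : pvPrime p) : Prime p := by
  obtain ⟨h1, h2⟩ := h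
  rw [Int.prime_iff_natAbs_prime]
  have h3 : p.natAbs = p.toNat := by omega
  rw [h3]; exact h2

lemma pvPrime_dvd_prime {q p : Int} (hq : pvPrime q) (hp : pvPrime p) (h : q ∣ p) : q = p := by
  obtain ⟨hq1, hq2⟩ := hq
  obtain ⟨hp1, hp2⟩ := hp
  have h2 : q.toNat ∣ p.toNat := (pvDvd_toNat (by omega) (by omega)).mp h
  have h3 := (Nat.prime_dvd_prime_iff_eq hq2 hp2).mp h2
  omega

lemma pvPrime_dvd_mul {q a b : Int} (hq : pvPrime q) : q ∣ a * b ↔ q ∣ a ∨ q ∣ b :=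
  (pvPrime_int hq).dvd_mul

-- ---- least factor ----
lemma pvL_prime {k : Int} (h : 2 ≤ k) : pvPrime (pvL k) := by
  have hp := Nat.minFac_prime (show k.toNat ≠ 1 by omega)
  refine ⟨?_, ?_⟩
  · unfold pvL; exact_mod_cast hp.two_le
  · simpa [pvL] using hp

lemma pvL_ge_two {k : Int} (h : 2 ≤ k) : 2 ≤ pvL k := (pvL_prime h).1

lemma pvL_dvd {k : Int} (h : 2 ≤ k) : pvL k ∣ k := by
  have h2 : (k.toNat.minFac : Int) ∣ (k.toNat : Int) := Int.natCast_dvd_natCast.mpr (Nat.minFac_dvd _)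
  simpa [pvL, Int.toNat_of_nonneg (show (0:Int) ≤ k by omega)] using h2

lemma pvL_le {k : Int} (h : 2 ≤ k) : pvL k ≤ k := by
  have := Nat.minFac_le (show 0 < k.toNat by omega); unfold pvL; omega

lemma pvL_min {k d : Int} (hk : 2 ≤ k) (hd : 2 ≤ d) (hdvd : d ∣ k) : pvL k ≤ d := by
  have h2 : d.toNat ∣ k.toNat := (pvDvd_toNat (by omega) (by omega)).mp hdvd
  have := Nat.minFac_le_of_dvd (by omega) h2; unfold pvL; omega

lemma pvL_self_iff {k : Int} (hk : 2 ≤ k) : pvL k = k ↔ k.toNat.Prime := by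
  constructor
  · intro h
    rw [Nat.prime_def_minFac]
    constructor
    · omega
    · unfold pvL at h; omega
  · intro h; have := (Nat.prime_def_minFac.mp h).2; unfold pvL; omega

lemma pvDvd_two_mul {p k : Int} (hp : 2 ≤ p) (hk : 1 ≤ k) (h : p ∣ k) (hne : k ≠ p) :
    2 * p ≤ k := by
  obtain ⟨t, rfl⟩ := h
  have ht : 1 ≤ t := by nlinarith
  have ht2 : 2 ≤ t := by
    rcases lt_or_ge t 2 with h1 | h1
    · interval_cases t
      · omega
    · exact h1
  nlinarith

-- ---- pvCountDiv ----
lemma pvCountDiv_not_dvd {i num : Int} (h1 : 2 ≤ i) (h2 : 1 ≤ num) (h : ¬ i ∣ num) :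
    pvCountDiv i num = 0 := by
  rw [pvCountDiv, dif_pos ⟨h1, h2⟩, if_neg (fun hc => h ((PySem.Int.mod_eq_zero_iff_dvd _ _).mp hc))]

lemma pvCountDiv_dvd {i num : Int} (h1 : 2 ≤ i) (h2 : 1 ≤ num) (h : i ∣ num) :
    pvCountDiv i num = pvCountDiv i (num / i) + 1 := by
  rw [pvCountDiv, dif_pos ⟨h1, h2⟩, if_pos ((PySem.Int.mod_eq_zero_iff_dvd _ _).mpr h),
    PySem.Int.floordiv_eq_ediv_of_pos (by omega)]

lemma pvNot_dvd_one {i : Int} (h1 : 2 ≤ i) : ¬ i ∣ (1 : Int) := by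
  intro h; have := Int.le_of_dvd one_pos h; omega

lemma pvCountDiv_self {p : Int} (hp : 2 ≤ p) : pvCountDiv p p = 1 := by
  rw [pvCountDiv_dvd hp (by omega) dvd_rfl, Int.ediv_self (by omega),
    pvCountDiv_not_dvd hp (by omega) (pvNot_dvd_one hp)]
  norm_num

lemma pvEdiv_lt {m q : Int} (hm : 1 ≤ m) (hq : 2 ≤ q) : m / q < m := by
  rw [Int.ediv_lt_iff_lt_mul (by omega)]; nlinarith

lemma pvOne_le_ediv {m q : Int} (hq : 0 < q) (hqm : q ≤ m) : 1 ≤ m / q := by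
  rw [Int.le_ediv_iff_mul_le hq]; omega

lemma pvCountDiv_mul_left {q p : Int} (hq : pvPrime q) (hp : pvPrime p) (hne : q ≠ p) :
    ∀ m : Int, 1 ≤ m → pvCountDiv q (p * m) = pvCountDiv q m := by
  suffices H : ∀ N : Nat, ∀ m : Int, m.toNat = N → 1 ≤ m →
      pvCountDiv q (p * m) = pvCountDiv q m by
    exact fun m hm => H m.toNat m rfl hm
  intro N
  induction N using Nat.strong_induction_on with
  | _ N IH =>
    intro m hN hm
    have hpm : 1 ≤ p * m := by nlinarith [hp.1]
    have hdiff : q ∣ p * m ↔ q ∣ m := by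
      rw [pvPrime_dvd_mul hq]
      constructor
      · rintro (h | h)
        · exact absurd (pvPrime_dvd_prime hq hp h) hne
        · exact h
      · exact Or.inr
    by_cases hd : q ∣ m
    · rw [pvCountDiv_dvd hq.1 hpm (hdiff.mpr hd), pvCountDiv_dvd hq.1 hm hd,
        Int.mul_ediv_assoc p hd]
      congr 1
      have hle : q ≤ m := Int.le_of_dvd (by omega) hd
      have hq1 := hq.1
      have h1 : 1 ≤ m / q := pvOne_le_ediv (by omega) hle
      have h2 : m / q < m := pvEdiv_lt hm hq.1
      exact IH (m / q).toNat (by omega) (m / q) rfl h1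
    · rw [pvCountDiv_not_dvd hq.1 hpm (fun h => hd (hdiff.mp h)),
        pvCountDiv_not_dvd hq.1 hm hd]

-- ---- pvStrip ----
lemma pvStrip_fst_eq (p : Int) : ∀ m : Int, (pvStrip p m).1 = pvCountDiv p m := by
  suffices H : ∀ N : Nat, ∀ m : Int, m.toNat = N → (pvStrip p m).1 = pvCountDiv p m by
    exact fun m => H m.toNat m rfl
  intro N
  induction N using Nat.strong_induction_on with
  | _ N IH =>
    intro m hN
    rw [pvStrip, pvCountDiv]
    by_cases hg : 2 ≤ p ∧ 1 ≤ m
    · rw [dif_pos hg, dif_pos hg]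
      by_cases hmod : PySem.Int.mod m p = 0
      · rw [if_pos hmod, if_pos hmod]
        have hd : p ∣ m := (PySem.Int.mod_eq_zero_iff_dvd _ _).mp hmod
        have hfd : PySem.Int.floordiv m p = m / p := PySem.Int.floordiv_eq_ediv_of_pos (by omega)
        have h2 : m / p < m := pvEdiv_lt hg.2 hg.1
        have h3 : 0 ≤ m / p := Int.ediv_nonneg (by omega) (by omega)
        simp only [hfd]
        rw [IH (m / p).toNat (by omega) (m / p) rfl]
      · rw [if_neg hmod, if_neg hmod]
    · rw [dif_neg hg, dif_neg hg]

lemma pvStrip_spec {p : Int} (hp : pvPrime p) :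
    ∀ m : Int, 1 ≤ m →
      1 ≤ (pvStrip p m).2 ∧ (pvStrip p m).2 ∣ m ∧ ¬ p ∣ (pvStrip p m).2 ∧
      (∀ q, pvPrime q → q ≠ p →
        ((q ∣ (pvStrip p m).2 ↔ q ∣ m) ∧ pvCountDiv q (pvStrip p m).2 = pvCountDiv q m)) ∧
      (p ∣ m → (pvStrip p m).2 < m) := by
  suffices H : ∀ N : Nat, ∀ m : Int, m.toNat = N → 1 ≤ m →
      1 ≤ (pvStrip p m).2 ∧ (pvStrip p m).2 ∣ m ∧ ¬ p ∣ (pvStrip p m).2 ∧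
      (∀ q, pvPrime q → q ≠ p →
        ((q ∣ (pvStrip p m).2 ↔ q ∣ m) ∧ pvCountDiv q (pvStrip p m).2 = pvCountDiv q m)) ∧
      (p ∣ m → (pvStrip p m).2 < m) by
    exact fun m hm => H m.toNat m rfl hm
  intro N
  induction N using Nat.strong_induction_on with
  | _ N IH =>
    intro m hN hm
    have hp1 := hp.1
    rw [pvStrip, dif_pos ⟨hp.1, hm⟩]
    by_cases hmod : PySem.Int.mod m p = 0
    · rw [if_pos hmod]
      have hd : p ∣ m := (PySem.Int.mod_eq_zero_iff_dvd _ _).mp hmod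
      have hfd : PySem.Int.floordiv m p = m / p := PySem.Int.floordiv_eq_ediv_of_pos (by omega)
      have hle : p ≤ m := Int.le_of_dvd (by omega) hd
      have h1 : 1 ≤ m / p := pvOne_le_ediv (by omega) hle
      have h2 : m / p < m := pvEdiv_lt hm hp.1
      have hmul : m = p * (m / p) := (Int.mul_ediv_cancel' hd).symm
      have hdvdm : (m / p) ∣ m := ⟨p, by rw [mul_comm]; exact hmul⟩
      simp only [hfd]
      obtain ⟨i1, i2, i3, i4, i5⟩ := IH (m / p).toNat (by omega) (m / p) rfl h1
      refine ⟨i1, ?_, i3, ?_, ?_⟩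
      · exact dvd_trans i2 hdvdm
      · intro q hq hqp
        obtain ⟨j1, j2⟩ := i4 q hq hqp
        constructor
        · rw [j1]
          constructor
          · intro h; exact dvd_trans h hdvdm
          · intro h
            have := (pvPrime_dvd_mul hq (a := p) (b := m / p)).mp (by rw [← hmul]; exact h)
            rcases this with h' | h'
            · exact absurd (pvPrime_dvd_prime hq hp h') hqp
            · exact h'
        · rw [j2]
          conv_rhs => rw [hmul]
          rw [pvCountDiv_mul_left hq hp hqp _ h1]
        -- wait direction: goal pvCountDiv q (m/p) = pvCountDiv q m; rhs m = p*(m/p) then mul_left gives = countdiv q (m/p). ok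
      · intro _
        calc (pvStrip p (m / p)).2 ≤ m / p := Int.le_of_dvd (by omega) i2
        _ < m := h2
    · rw [if_neg hmod]
      have hd : ¬ p ∣ m := fun h => hmod ((PySem.Int.mod_eq_zero_iff_dvd _ _).mpr h)
      exact ⟨hm, dvd_rfl, hd, fun q _ _ => ⟨Iff.rfl, rfl⟩, fun h => absurd h hd⟩

-- ---- pvF facts ----
lemma pvF_mem {n k : Int} {x : Int × Int} (hx : x ∈ pvF n k) :
    pvPrime x.1 ∧ x.1 ≤ n ∧ x.1 ∣ k ∧ x.2 = pvCountDiv x.1 k := by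
  unfold pvF at hx
  rw [List.mem_filterMap] at hx
  obtain ⟨p, hp, heq⟩ := hx
  rw [PySem.List.mem_pyRange_one] at hp
  by_cases hc : 2 ≤ p ∧ p.toNat.Prime ∧ p ∣ k
  · rw [if_pos hc] at heq
    obtain rfl := Option.some.inj heq
    exact ⟨⟨hc.1, hc.2.1⟩, by omega, hc.2.2, rfl⟩
  · rw [if_neg hc] at heq; cases heq

lemma pvF_nil_one (n : Int) : pvF n 1 = [] := by
  unfold pvF; rw [List.filterMap_eq_nil_iff]
  intro p _
  rw [if_neg]
  rintro ⟨h1, _, h3⟩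
  exact absurd (Int.le_of_dvd one_pos h3) (by omega)

lemma pvF_eq_nil_of_lt {m k : Int} (hk : 2 ≤ k) (hm : m < pvL k) : pvF m k = [] := by
  unfold pvF; rw [List.filterMap_eq_nil_iff]
  intro p hp
  rw [PySem.List.mem_pyRange_one] at hp
  rw [if_neg]
  rintro ⟨h1, h2, h3⟩
  have := pvL_min hk h1 h3
  omega

lemma pvF_succ_none {m k : Int} (hm : 1 ≤ m) (h : ¬((m + 1).toNat.Prime ∧ (m + 1) ∣ k)) :
    pvF (m + 1) k = pvF m k := by
  unfold pvF
  rw [show (m + 1 + 1 : Int) = (m + 1) + 1 from rfl,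
    PySem.List.pyRange_one_succ_right (show (2:Int) ≤ m + 1 by omega), List.filterMap_append]
  have hnil : (List.filterMap
      (fun p => if 2 ≤ p ∧ p.toNat.Prime ∧ p ∣ k then some (p, pvCountDiv p k) else none)
      [m + 1]) = [] := by
    simp only [List.filterMap_cons, List.filterMap_nil]
    rw [if_neg]
    rintro ⟨_, c2, c3⟩
    exact h ⟨c2, c3⟩
  rw [hnil, List.append_nil]

lemma pvF_succ_dvd {m k : Int} (hm : 1 ≤ m) (hp : pvPrime (m + 1)) (h : (m + 1) ∣ k) :
    pvF (m + 1) k = pvF m k ++ [(m + 1, pvCountDiv (m + 1) k)] := by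
  unfold pvF
  rw [show (m + 1 + 1 : Int) = (m + 1) + 1 from rfl,
    PySem.List.pyRange_one_succ_right (show (2:Int) ≤ m + 1 by omega), List.filterMap_append]
  congr 1
  simp only [List.filterMap_cons, List.filterMap_nil]
  rw [if_pos ⟨hp.1, hp.2, h⟩]

lemma pvF_cons_strip {n m : Int} (hm : 2 ≤ m) (hn : m ≤ n) :
    pvF n m = (pvL m, pvCountDiv (pvL m) m) :: pvF n (pvStrip (pvL m) m).2 := by
  have hp : pvPrime (pvL m) := pvL_prime hm
  have hp2 : 2 ≤ pvL m := hp.1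
  have hpd : pvL m ∣ m := pvL_dvd hm
  obtain ⟨s1, s2, s3, s4, _⟩ := pvStrip_spec hp m (by omega)
  have hpn : pvL m ≤ n := le_trans (pvL_le hm) hn
  unfold pvF
  rw [PySem.List.pyRange_one_append 2 (pvL m) (n + 1) (by omega) (by omega),
    PySem.List.pyRange_one_cons (show pvL m < n + 1 by omega)]
  rw [List.filterMap_append, List.filterMap_append, List.filterMap_cons, List.filterMap_cons]
  have hnil1 : ((PySem.List.pyRange 2 (pvL m)).filterMap
      (fun p => if 2 ≤ p ∧ p.toNat.Prime ∧ p ∣ m then some (p, pvCountDiv p m) else none)) = [] := by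
    rw [List.filterMap_eq_nil_iff]
    intro p hpmem
    rw [PySem.List.mem_pyRange_one] at hpmem
    rw [if_neg]
    rintro ⟨c1, c2, c3⟩
    have := pvL_min hm c1 c3
    omega
  have hnil2 : ((PySem.List.pyRange 2 (pvL m)).filterMap
      (fun p => if 2 ≤ p ∧ p.toNat.Prime ∧ p ∣ (pvStrip (pvL m) m).2
        then some (p, pvCountDiv p (pvStrip (pvL m) m).2) else none)) = [] := by
    rw [List.filterMap_eq_nil_iff]
    intro p hpmem
    rw [PySem.List.mem_pyRange_one] at hpmem
    rw [if_neg]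
    rintro ⟨c1, c2, c3⟩
    have := pvL_min hm c1 (dvd_trans c3 s2)
    omega
  rw [hnil1, hnil2]
  rw [if_pos ⟨hp.1, hp.2, hpd⟩, if_neg (by rintro ⟨_, _, c3⟩; exact s3 c3)]
  simp only [List.nil_append]
  congr 1
  apply List.filterMap_congr
  intro q hq
  rw [PySem.List.mem_pyRange_one] at hq
  by_cases hc : 2 ≤ q ∧ q.toNat.Prime ∧ q ∣ m
  · obtain ⟨j1, j2⟩ := s4 q ⟨hc.1, hc.2.1⟩ (by omega)
    rw [if_pos hc, if_pos ⟨hc.1, hc.2.1, j1.mpr hc.2.2⟩, j2]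
  · rw [if_neg hc, if_neg]
    rintro ⟨c1, c2, c3⟩
    obtain ⟨j1, _⟩ := s4 q ⟨c1, c2⟩ (by omega)
    exact hc ⟨c1, c2, j1.mp c3⟩

-- ---- pvTab facts ----
lemma pvTab_length {α : Type} (N : Nat) (F : Int → α) : (pvTab N F).length = N := by
  simp [pvTab]

lemma pvTab_getElem {α : Type} (N : Nat) (F : Int → α) (k : Nat) (hk : k < N) :
    (pvTab N F)[k]'(by rw [pvTab_length]; exact hk) = F (k : Int) := by
  have h := List.getElem_map (fun t : Nat => F (t : Int)) (l := List.range N) (i := k)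
    (h := by simpa using hk)
  unfold pvTab
  rw [List.getElem_range] at h
  exact h

lemma pvTab_get {α : Type} (N : Nat) (F : Int → α) (d : α) {i : Int}
    (h0 : 0 ≤ i) (h1 : i < (N : Int)) :
    PySem.List.pyGetD (pvTab N F) i d = F i := by
  rw [PySem.List.pyGetD_eq_getElem _ _ h0 (by rw [pvTab_length]; exact h1)]
  rw [pvTab_getElem N F i.toNat (by omega)]
  rw [Int.toNat_of_nonneg h0]

lemma pvTab_set {α : Type} (N : Nat) (F : Int → α) {i : Int} (v : α)
    (h0 : 0 ≤ i) (h1 : i < (N : Int)) :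
    PySem.List.pySetD (pvTab N F) i v = pvTab N (fun t => if t = i then v else F t) := by
  rw [PySem.List.pySetD_of_nonneg _ _ h0]
  apply List.ext_getElem (by simp [pvTab])
  intro k hk1 hk2
  rw [List.getElem_set]
  have hkN : k < N := by simpa [pvTab_length] using hk1
  rw [pvTab_getElem N F k hkN, pvTab_getElem N _ k hkN]
  by_cases hk : i.toNat = k
  · rw [if_pos hk, if_pos (by omega)]
  · rw [if_neg hk, if_neg (by omega)]

lemma pvTab_congr {α : Type} {N : Nat} {F G : Int → α}
    (h : ∀ t : Int, 0 ≤ t → t < (N : Int) → F t = G t) : pvTab N F = pvTab N G := by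
  unfold pvTab
  apply List.map_congr_left
  intro t ht
  rw [List.mem_range] at ht
  exact h t (by omega) (by omega)

lemma pvTab_map {α β : Type} (N : Nat) (F : Int → α) (g : α → β) :
    (pvTab N F).map g = pvTab N (fun t => g (F t)) := by
  simp [pvTab, List.map_map]

lemma pvRepeat_tab {α : Type} (a : α) (m : Int) :
    PySem.List.pyRepeat [a] m = pvTab m.toNat (fun _ => a) := by
  rw [PySem.List.pyRepeat_singleton]
  apply List.ext_getElem (by simp [pvTab])
  intro k hk1 hk2
  simp [pvTab]

-- ---- Dict-as-list facts ----
lemma pvDict_contains_mk_false {l : List (Int × Int)} {i : Int} (h : ∀ x ∈ l, x.1 ≠ i) :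
    (PySem.Dict.mk l).contains i = false := by
  rw [← Bool.not_eq_true, PySem.Dict.contains_iff_mem_keys, PySem.Dict.keys_mk]
  intro hmem
  obtain ⟨x, hx, hx2⟩ := List.mem_map.mp hmem
  exact h x hx hx2

lemma pvDict_get?_mk_none {l : List (Int × Int)} {i : Int} (h : ∀ x ∈ l, x.1 ≠ i) :
    (PySem.Dict.mk l).get? i = none := by
  rw [PySem.Dict.get?_eq_none_iff_not_mem_keys, PySem.Dict.keys_mk]
  intro hmem
  obtain ⟨x, hx, hx2⟩ := List.mem_map.mp hmem
  exact h x hx hx2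

lemma pvDict_mk_insert {l : List (Int × Int)} {i v : Int} (h : ∀ x ∈ l, x.1 ≠ i) :
    (PySem.Dict.mk l).insert i v = PySem.Dict.mk (l ++ [(i, v)]) := by
  apply PySem.Dict.ext
  rw [PySem.Dict.items_insert_of_not_contains _ _ (pvDict_contains_mk_false h)]

-- ---- range with positive step ----
lemma pvRange_pos_nil {a b s : Int} (hs : 0 < s) (h : b ≤ a) : PySem.List.pyRange a b s = [] := by
  rw [PySem.List.pyRange_of_pos _ _ hs, if_neg (by omega)]
  simp

lemma pvRange_pos_cons {a b s : Int} (hs : 0 < s) (h : a < b) :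
    PySem.List.pyRange a b s = a :: PySem.List.pyRange (a + s) b s := by
  rw [PySem.List.pyRange_of_pos _ _ hs, PySem.List.pyRange_of_pos _ _ hs, if_pos h]
  by_cases h2 : a + s < b
  · rw [if_pos h2]
    have harith : (b - a + s - 1) / s = (b - (a + s) + s - 1) / s + 1 := by
      have := Int.add_mul_ediv_right (b - (a + s) + s - 1) 1 (show s ≠ 0 by omega)
      rw [show b - (a + s) + s - 1 + 1 * s = b - a + s - 1 by ring] at this
      rw [this]
    have hq : 0 ≤ (b - (a + s) + s - 1) / s := Int.ediv_nonneg (by omega) (by omega)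
    rw [harith, show ((b - (a + s) + s - 1) / s + 1).toNat = ((b - (a + s) + s - 1) / s).toNat + 1 by omega]
    rw [List.range_succ_eq_map]
    simp only [List.map_cons, List.map_map, Nat.cast_zero, mul_zero, add_zero]
    congr 1
    apply List.map_congr_left
    intro x _
    simp only [Function.comp_apply]
    push_cast
    ring
  · rw [if_neg h2]
    have hlow : s ≤ b - a + s - 1 := by omega
    have hhigh : b - a + s - 1 < 2 * s := by omega
    have h1 : (b - a + s - 1) / s = 1 := by
      have e1 : 1 ≤ (b - a + s - 1) / s := by rw [Int.le_ediv_iff_mul_le (by omega)]; omega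
      have e2 : (b - a + s - 1) / s < 2 := by rw [Int.ediv_lt_iff_lt_mul (by omega)]; omega
      omega
    rw [h1]
    simp

lemma pvDvd_between {i t a : Int} (hi : 1 ≤ i) (ht : i ∣ t) (ha : i ∣ a)
    (h1 : a ≤ t) (h2 : t < a + i) : t = a := by
  have hd : i ∣ t - a := dvd_sub ht ha
  obtain ⟨c, hc⟩ := hd
  rcases lt_trichotomy c 0 with hc' | hc' | hc'
  · have : i * c ≤ i * (-1) := by nlinarith
    linarith
  · rw [hc', mul_zero] at hc; omega
  · have : i * 1 ≤ i * c := by nlinarith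
    linarith

-- ---- A-side loop invariants ----
def pvDescA (m k : Int) : Option (PySem.Dict Int Int) :=
  if 2 ≤ k ∧ pvL k ≤ m then some (PySem.Dict.mk (pvF m k)) else none

def pvMidA (m a k : Int) : Option (PySem.Dict Int Int) :=
  if 2 ≤ k ∧ (pvL k ≤ m ∨ k = m + 1 ∨ ((m + 1) ∣ k ∧ 2 * (m + 1) ≤ k ∧ k < a))
  then some (PySem.Dict.mk
    (pvF (if k = m + 1 ∨ ((m + 1) ∣ k ∧ 2 * (m + 1) ≤ k ∧ k < a) then m + 1 else m) k))
  else none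

def pvOut (n : Int) : List (Option (List (Int × Int))) :=
  pvTab (n + 1).toNat (fun k => if 2 ≤ k then some (pvF n k) else none)

lemma pvInnerA_step {n m a : Int} (hm : 1 ≤ m) (hp : pvPrime (m + 1))
    (hdvd : (m + 1) ∣ a) (h2a : 2 * (m + 1) ≤ a) (han : a ≤ n) :
    pvInnerA (m + 1) (pvTab (n + 1).toNat (pvMidA m a)) a
      = pvTab (n + 1).toNat (pvMidA m (a + (m + 1))) := by
  have ha0 : 0 ≤ a := by omega
  have haN : a < ((n + 1).toNat : Int) := by omega
  have hself : pvMidA m a a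
      = if pvL a ≤ m then some (PySem.Dict.mk (pvF m a)) else none := by
    unfold pvMidA
    have hne : ¬(a = m + 1 ∨ ((m + 1) ∣ a ∧ 2 * (m + 1) ≤ a ∧ a < a)) := by
      rintro (h | ⟨_, _, h⟩) <;> omega
    by_cases hsm : pvL a ≤ m
    · rw [if_pos ⟨by omega, Or.inl hsm⟩, if_neg hne, if_pos hsm]
    · rw [if_neg (by rintro ⟨_, h | h⟩; exact hsm h; exact hne h), if_neg hsm]
  have hcongr : ∀ v : Option (PySem.Dict Int Int),
      pvTab (n + 1).toNat (fun t => if t = a then v else pvMidA m a t)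
        = pvTab (n + 1).toNat (fun t => if t = a then v else pvMidA m (a + (m + 1)) t) := by
    intro v
    apply pvTab_congr
    intro t _ _
    by_cases hta : t = a
    · rw [if_pos hta, if_pos hta]
    · rw [if_neg hta, if_neg hta]
      unfold pvMidA
      have hiff : ((m + 1) ∣ t ∧ 2 * (m + 1) ≤ t ∧ t < a)
          ↔ ((m + 1) ∣ t ∧ 2 * (m + 1) ≤ t ∧ t < a + (m + 1)) := by
        constructor
        · rintro ⟨c1, c2, c3⟩; exact ⟨c1, c2, by omega⟩
        · rintro ⟨c1, c2, c3⟩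
          refine ⟨c1, c2, ?_⟩
          rcases lt_or_ge t a with h' | h'
          · exact h'
          · exact absurd (pvDvd_between (by omega) c1 hdvd h' c3) hta
      split_ifs <;> first | rfl | (exfalso; tauto)
  have hkeysF : ∀ x ∈ pvF m a, x.1 ≠ m + 1 := by
    intro x hx
    have := (pvF_mem hx).2.1
    omega
  have hFtarget : pvF (m + 1) a = pvF m a ++ [(m + 1, pvCountDiv (m + 1) a)] :=
    pvF_succ_dvd hm hp hdvd
  have hmidGoal : pvMidA m (a + (m + 1)) a
      = some (PySem.Dict.mk (pvF (m + 1) a)) := by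
    unfold pvMidA
    have hupd : a = m + 1 ∨ ((m + 1) ∣ a ∧ 2 * (m + 1) ≤ a ∧ a < a + (m + 1)) :=
      Or.inr ⟨hdvd, h2a, by omega⟩
    rw [if_pos ⟨by omega, Or.inr hupd⟩, if_pos hupd]
  unfold pvInnerA
  rw [pvTab_get _ _ _ ha0 haN, hself]
  by_cases hsm : pvL a ≤ m
  · rw [if_pos hsm]
    simp only []
    rw [pvTab_get _ _ _ ha0 haN, hself, if_pos hsm]
    simp only [Option.getD_some]
    rw [pvDict_get?_mk_none hkeysF]
    rw [pvDict_mk_insert hkeysF]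
    rw [pvTab_set _ _ _ ha0 haN]
    have hmatch : (match (none : Option Int) with
        | some v => (PySem.Dict.mk (pvF m a)).insert (m + 1) (v + pvCountDiv (m + 1) a)
        | none => PySem.Dict.mk (pvF m a ++ [(m + 1, pvCountDiv (m + 1) a)]))
        = PySem.Dict.mk (pvF m a ++ [(m + 1, pvCountDiv (m + 1) a)]) := rfl
    rw [hmatch, ← hFtarget, hcongr]
    apply pvTab_congr
    intro t _ _
    by_cases hta : t = a
    · rw [if_pos hta, hta, hmidGoal]
    · rw [if_neg hta]
  · rw [if_neg hsm]
    simp only []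
    rw [pvTab_set _ _ _ ha0 haN]
    rw [pvTab_get _ _ _ ha0 haN, if_pos rfl]
    simp only [Option.getD_some]
    have hknil : ∀ x ∈ ([] : List (Int × Int)), x.1 ≠ m + 1 := by intro x hx; cases hx
    have hempty : (PySem.Dict.empty : PySem.Dict Int Int) = PySem.Dict.mk [] := rfl
    rw [hempty, pvDict_get?_mk_none hknil, pvDict_mk_insert hknil]
    have hmatch : (match (none : Option Int) with
        | some v => (PySem.Dict.mk ([] : List (Int × Int))).insert (m + 1) (v + pvCountDiv (m + 1) a)
        | none => PySem.Dict.mk ([] ++ [(m + 1, pvCountDiv (m + 1) a)]))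
        = PySem.Dict.mk ([] ++ [(m + 1, pvCountDiv (m + 1) a)]) := rfl
    rw [hmatch]
    have hFa : pvF (m + 1) a = [] ++ [(m + 1, pvCountDiv (m + 1) a)] := by
      rw [pvF_succ_dvd hm hp hdvd, pvF_eq_nil_of_lt (by omega) (by omega)]
    rw [pvTab_set _ _ _ ha0 haN, ← hFa]
    have hset2 : ∀ t : Int, (if t = a then some (PySem.Dict.mk (pvF (m + 1) a))
        else if t = a then some (PySem.Dict.mk ([] : List (Int × Int))) else pvMidA m a t)
        = (if t = a then some (PySem.Dict.mk (pvF (m + 1) a)) else pvMidA m a t) := by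
      intro t
      by_cases hta : t = a
      · rw [if_pos hta, if_pos hta]
      · rw [if_neg hta, if_neg hta, if_neg hta]
    rw [show (fun t => if t = a then some (PySem.Dict.mk (pvF (m + 1) a))
        else if t = a then some (PySem.Dict.mk ([] : List (Int × Int))) else pvMidA m a t)
      = (fun t => if t = a then some (PySem.Dict.mk (pvF (m + 1) a)) else pvMidA m a t)
      from funext hset2]
    rw [hcongr]
    apply pvTab_congr
    intro t _ _
    by_cases hta : t = a
    · rw [if_pos hta, hta, hmidGoal]
    · rw [if_neg hta]

lemma pvInnerA_loop {n m : Int} (hm : 1 ≤ m) (hp : pvPrime (m + 1)) :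
    ∀ K : Nat, ∀ a : Int, (n + 1 - a).toNat = K → (m + 1) ∣ a → 2 * (m + 1) ≤ a →
    (PySem.List.pyRange a (n + 1) (m + 1)).foldl (pvInnerA (m + 1))
        (pvTab (n + 1).toNat (pvMidA m a))
      = pvTab (n + 1).toNat (pvMidA m (n + 1)) := by
  intro K
  induction K using Nat.strong_induction_on with
  | _ K IH =>
    intro a hK hdvd h2a
    by_cases hend : n + 1 ≤ a
    · rw [pvRange_pos_nil (by omega) hend]
      simp only [List.foldl_nil]
      apply pvTab_congr
      intro t ht0 htN
      unfold pvMidA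
      have ha' : t < a := by omega
      have hb' : t < n + 1 := by omega
      split_ifs <;> first | rfl | (exfalso; tauto)
    · rw [pvRange_pos_cons (by omega) (by omega)]
      simp only [List.foldl_cons]
      rw [pvInnerA_step hm hp hdvd h2a (by omega)]
      exact IH (n + 1 - (a + (m + 1))).toNat (by omega) (a + (m + 1)) rfl
        (dvd_add hdvd dvd_rfl) (by omega)

lemma pvMidA_top {n m : Int} (hm : 1 ≤ m) (hmn : m + 1 ≤ n) (hpr : (m + 1).toNat.Prime)
    {t : Int} (ht0 : 0 ≤ t) (htn : t ≤ n) : pvMidA m (n + 1) t = pvDescA (m + 1) t := by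
  unfold pvMidA pvDescA
  by_cases h2t : 2 ≤ t
  · by_cases hdv : (m + 1) ∣ t
    · have hsel : t = m + 1 ∨ ((m + 1) ∣ t ∧ 2 * (m + 1) ≤ t ∧ t < n + 1) := by
        by_cases hteq : t = m + 1
        · exact Or.inl hteq
        · exact Or.inr ⟨hdv, pvDvd_two_mul (by omega) (by omega) hdv hteq, by omega⟩
      have hle : pvL t ≤ m + 1 := pvL_min h2t (by omega) hdv
      rw [if_pos ⟨h2t, Or.inr hsel⟩, if_pos hsel, if_pos ⟨h2t, hle⟩]
    · have hsel : ¬(t = m + 1 ∨ ((m + 1) ∣ t ∧ 2 * (m + 1) ≤ t ∧ t < n + 1)) := by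
        rintro (h | ⟨h, _⟩)
        · exact hdv (h ▸ dvd_rfl)
        · exact hdv h
      have hval : pvF (m + 1) t = pvF m t := pvF_succ_none hm (fun h => hdv h.2)
      have hLne : pvL t ≠ m + 1 := by
        intro h
        exact hdv (h ▸ pvL_dvd h2t)
      by_cases hLm : pvL t ≤ m
      · rw [if_pos ⟨h2t, Or.inl hLm⟩, if_neg hsel, if_pos ⟨h2t, by omega⟩, hval]
      · rw [if_neg, if_neg]
        · rintro ⟨_, h⟩; omega
        · rintro ⟨_, h | h⟩
          · exact hLm h
          · exact hsel h
  · rw [if_neg, if_neg]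
    · rintro ⟨h, _⟩; omega
    · rintro ⟨h, _⟩; omega

lemma pvStepA_desc {n m : Int} (hm : 1 ≤ m) (hmn : m + 1 ≤ n) :
    pvStepA n (pvTab (n + 1).toNat (pvDescA m)) (m + 1)
      = pvTab (n + 1).toNat (pvDescA (m + 1)) := by
  have h0 : (0:Int) ≤ m + 1 := by omega
  have hN : m + 1 < ((n + 1).toNat : Int) := by omega
  unfold pvStepA
  rw [pvTab_get _ _ _ h0 hN]
  by_cases hpr : (m + 1).toNat.Prime
  · have hLeq : pvL (m + 1) = m + 1 := (pvL_self_iff (by omega)).mpr hpr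
    have hdesc_none : pvDescA m (m + 1) = none := by
      unfold pvDescA
      rw [if_neg]
      rintro ⟨_, h⟩
      omega
    rw [hdesc_none]
    show (PySem.List.pyRange (2 * (m + 1)) (n + 1) (m + 1)).foldl (pvInnerA (m + 1))
        (PySem.List.pySetD (pvTab (n + 1).toNat (pvDescA m)) (m + 1)
          (some (PySem.Dict.empty.insert (m + 1) 1)))
      = pvTab (n + 1).toNat (pvDescA (m + 1))
    rw [pvTab_set _ _ _ h0 hN]
    have hknil : ∀ x ∈ ([] : List (Int × Int)), x.1 ≠ m + 1 := by intro x hx; cases hx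
    have hins : (PySem.Dict.empty : PySem.Dict Int Int).insert (m + 1) 1
        = PySem.Dict.mk (pvF (m + 1) (m + 1)) := by
      have h1 : pvF (m + 1) (m + 1) = [] ++ [(m + 1, pvCountDiv (m + 1) (m + 1))] := by
        rw [pvF_succ_dvd hm ⟨by omega, hpr⟩ dvd_rfl, pvF_eq_nil_of_lt (by omega) (by omega)]
      rw [h1, pvCountDiv_self (by omega)]
      exact pvDict_mk_insert hknil
    have hstart : pvTab (n + 1).toNat
        (fun t => if t = m + 1 then some (PySem.Dict.empty.insert (m + 1) 1) else pvDescA m t)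
        = pvTab (n + 1).toNat (pvMidA m (2 * (m + 1))) := by
      apply pvTab_congr
      intro t ht0 htN
      by_cases hta : t = m + 1
      · rw [if_pos hta, hta, hins]
        unfold pvMidA
        rw [if_pos ⟨by omega, Or.inr (Or.inl rfl)⟩, if_pos (Or.inl rfl)]
      · rw [if_neg hta]
        unfold pvDescA pvMidA
        have hc1 : ¬(t = m + 1 ∨ ((m + 1) ∣ t ∧ 2 * (m + 1) ≤ t ∧ t < 2 * (m + 1))) := by
          rintro (h | ⟨_, h, h'⟩)
          · exact hta h
          · omega
        by_cases hok : 2 ≤ t ∧ pvL t ≤ m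
        · rw [if_pos hok, if_pos ⟨hok.1, Or.inl hok.2⟩, if_neg hc1]
        · rw [if_neg hok, if_neg]
          rintro ⟨c1, c2 | c2⟩
          · exact hok ⟨c1, c2⟩
          · exact hc1 c2
    rw [hstart, pvInnerA_loop hm ⟨by omega, hpr⟩ (n + 1 - 2 * (m + 1)).toNat (2 * (m + 1)) rfl
      ⟨2, by ring⟩ le_rfl]
    apply pvTab_congr
    intro t ht0 htN
    exact pvMidA_top hm hmn hpr ht0 (by omega)
  · have hLle : pvL (m + 1) ≤ m := by
      have h1 := pvL_le (show (2:Int) ≤ m + 1 by omega)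
      have hne : pvL (m + 1) ≠ m + 1 := fun h => hpr ((pvL_self_iff (by omega)).mp h)
      omega
    have hdesc : pvDescA m (m + 1) = some (PySem.Dict.mk (pvF m (m + 1))) := by
      unfold pvDescA
      rw [if_pos ⟨by omega, hLle⟩]
    rw [hdesc]
    show pvTab (n + 1).toNat (pvDescA m) = pvTab (n + 1).toNat (pvDescA (m + 1))
    apply pvTab_congr
    intro t ht0 htN
    unfold pvDescA
    by_cases h2t : 2 ≤ t
    · have hLiff : pvL t ≤ m ↔ pvL t ≤ m + 1 := by
        constructor
        · omega
        · intro h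
          have hne : pvL t ≠ m + 1 := by
            intro he
            have := (pvL_prime h2t).2
            rw [he] at this
            exact hpr this
          omega
      have hval : pvF (m + 1) t = pvF m t := pvF_succ_none hm (fun h => hpr h.1)
      by_cases hLm : pvL t ≤ m
      · rw [if_pos ⟨h2t, hLm⟩, if_pos ⟨h2t, hLiff.mp hLm⟩, hval]
      · rw [if_neg (by rintro ⟨_, h⟩; exact hLm h),
          if_neg (by rintro ⟨_, h⟩; exact hLm (hLiff.mpr h))]
    · rw [if_neg (by rintro ⟨h, _⟩; omega), if_neg (by rintro ⟨h, _⟩; omega)]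

lemma pvOuterA_loop {n : Int} : ∀ K : Nat, ∀ m : Int, m.toNat = K → 1 ≤ m → m ≤ n →
    (PySem.List.pyRange 2 (m + 1) 1).foldl (pvStepA n)
        (pvTab (n + 1).toNat (fun _ => none))
      = pvTab (n + 1).toNat (pvDescA m) := by
  intro K
  induction K using Nat.strong_induction_on with
  | _ K IH =>
    intro m hK hm1 hmn
    by_cases hbase : m = 1
    · subst hbase
      rw [PySem.List.pyRange_one_eq_nil (by omega)]
      simp only [List.foldl_nil]
      apply pvTab_congr
      intro t _ _
      unfold pvDescA
      rw [if_neg]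
      rintro ⟨h2t, hL⟩
      have := pvL_ge_two h2t
      omega
    · have hm2 : 2 ≤ m := by omega
      rw [show m + 1 = (m - 1 + 1) + 1 by ring,
        PySem.List.pyRange_one_succ_right (by omega), List.foldl_append]
      rw [IH (m - 1).toNat (by omega) (m - 1) rfl (by omega) (by omega)]
      simp only [List.foldl_cons, List.foldl_nil]
      have hs := pvStepA_desc (n := n) (m := m - 1) (by omega) (by omega)
      rw [show m - 1 + 1 = m by ring] at hs
      rw [show m - 1 + 1 = m by ring]
      exact hs

lemma pvA_eq_pvOut (n : Int) : sieve_prime_factorizations n = pvOut n := by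
  unfold sieve_prime_factorizations pvOut
  rw [pvRepeat_tab]
  show ((PySem.List.pyRange 2 (n + 1) 1).foldl (pvStepA n)
      (pvTab (n + 1).toNat (fun _ => none))).map (Option.map PySem.Dict.items)
    = pvTab (n + 1).toNat (fun k => if 2 ≤ k then some (pvF n k) else none)
  by_cases hn : n ≤ 1
  · rw [PySem.List.pyRange_one_eq_nil (by omega)]
    simp only [List.foldl_nil]
    rw [pvTab_map]
    apply pvTab_congr
    intro t _ htN
    rw [if_neg (by omega)]
    rfl
  · rw [pvOuterA_loop n.toNat n rfl (by omega) le_rfl, pvTab_map]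
    apply pvTab_congr
    intro t ht0 htN
    unfold pvDescA
    by_cases h2t : 2 ≤ t
    · rw [if_pos ⟨h2t, le_trans (pvL_le h2t) (by omega)⟩, if_pos h2t]
      rfl
    · rw [if_neg (by rintro ⟨h, _⟩; exact h2t h), if_neg h2t]
      rfl

-- ---- B-side loop invariants ----
def pvDescS (m k : Int) : Int := if 2 ≤ k ∧ pvL k ≤ m then pvL k else 0

def pvMidS (m a k : Int) : Int :=
  if 2 ≤ k ∧ (pvL k ≤ m ∨ ((m + 1) ∣ k ∧ k < a)) then pvL k else 0

def pvSpf (n : Int) : List Int := pvTab (n + 1).toNat (fun k => if 2 ≤ k then pvL k else 0)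

lemma pvInnerS_step {n m a : Int} (hm : 1 ≤ m) (hdvd : (m + 1) ∣ a)
    (hge : m + 1 ≤ a) (han : a ≤ n) :
    pvInnerS (pvTab (n + 1).toNat (pvMidS m a)) a (m + 1)
      = pvTab (n + 1).toNat (pvMidS m (a + (m + 1))) := by
  have ha0 : 0 ≤ a := by omega
  have haN : a < ((n + 1).toNat : Int) := by omega
  have h2a : 2 ≤ a := by omega
  have hself : pvMidS m a a = if pvL a ≤ m then pvL a else 0 := by
    unfold pvMidS
    by_cases hsm : pvL a ≤ m
    · rw [if_pos ⟨h2a, Or.inl hsm⟩, if_pos hsm]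
    · rw [if_neg, if_neg hsm]
      rintro ⟨_, h | ⟨_, h⟩⟩
      · exact hsm h
      · omega
  have hcongr : ∀ t : Int, 0 ≤ t → t < ((n + 1).toNat : Int) → t ≠ a →
      pvMidS m a t = pvMidS m (a + (m + 1)) t := by
    intro t _ _ hta
    unfold pvMidS
    have hiff : ((m + 1) ∣ t ∧ t < a) ↔ ((m + 1) ∣ t ∧ t < a + (m + 1)) := by
      constructor
      · rintro ⟨c1, c2⟩; exact ⟨c1, by omega⟩
      · rintro ⟨c1, c2⟩
        refine ⟨c1, ?_⟩
        rcases lt_or_ge t a with h' | h'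
        · exact h'
        · exact absurd (pvDvd_between (by omega) c1 hdvd h' c2) hta
    split_ifs <;> first | rfl | (exfalso; tauto)
  unfold pvInnerS
  rw [pvTab_get _ _ _ ha0 haN, hself]
  by_cases hsm : pvL a ≤ m
  · have hLa : pvL a ≠ 0 := by have := pvL_ge_two h2a; omega
    rw [if_pos hsm, if_neg hLa]
    apply pvTab_congr
    intro t ht0 htN
    by_cases hta : t = a
    · subst hta
      rw [hself, if_pos hsm]
      unfold pvMidS
      rw [if_pos ⟨h2a, Or.inr ⟨hdvd, by omega⟩⟩]
    · exact hcongr t ht0 htN hta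
  · rw [if_neg hsm, if_pos rfl, pvTab_set _ _ _ ha0 haN]
    apply pvTab_congr
    intro t ht0 htN
    by_cases hta : t = a
    · subst hta
      rw [if_pos rfl]
      unfold pvMidS
      rw [if_pos ⟨h2a, Or.inr ⟨hdvd, by omega⟩⟩]
      have h1 : pvL t ≤ m + 1 := pvL_min h2a (by omega) hdvd
      omega
    · rw [if_neg hta]
      exact hcongr t ht0 htN hta

lemma pvInnerS_loop {n m : Int} (hm : 1 ≤ m) :
    ∀ K : Nat, ∀ a : Int, (n + 1 - a).toNat = K → (m + 1) ∣ a → m + 1 ≤ a →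
    (PySem.List.pyRange a (n + 1) (m + 1)).foldl (fun spf j => pvInnerS spf j (m + 1))
        (pvTab (n + 1).toNat (pvMidS m a))
      = pvTab (n + 1).toNat (pvMidS m (n + 1)) := by
  intro K
  induction K using Nat.strong_induction_on with
  | _ K IH =>
    intro a hK hdvd hge
    by_cases hend : n + 1 ≤ a
    · rw [pvRange_pos_nil (by omega) hend]
      simp only [List.foldl_nil]
      apply pvTab_congr
      intro t ht0 htN
      unfold pvMidS
      have ha' : t < a := by omega
      have hb' : t < n + 1 := by omega
      split_ifs <;> first | rfl | (exfalso; tauto)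
    · rw [pvRange_pos_cons (by omega) (by omega)]
      simp only [List.foldl_cons]
      rw [pvInnerS_step hm hdvd hge (by omega)]
      exact IH (n + 1 - (a + (m + 1))).toNat (by omega) (a + (m + 1)) rfl
        (dvd_add hdvd dvd_rfl) (by omega)

lemma pvMidS_top {n m : Int} (hm : 1 ≤ m) (hmn : m + 1 ≤ n) {t : Int} (htn : t ≤ n) :
    pvMidS m (n + 1) t = pvDescS (m + 1) t := by
  unfold pvMidS pvDescS
  by_cases h2t : 2 ≤ t
  · by_cases hdv : (m + 1) ∣ t
    · have hle : pvL t ≤ m + 1 := pvL_min h2t (by omega) hdv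
      rw [if_pos ⟨h2t, Or.inr ⟨hdv, by omega⟩⟩, if_pos ⟨h2t, hle⟩]
    · have hLne : pvL t ≠ m + 1 := fun h => hdv (h ▸ pvL_dvd h2t)
      by_cases hLm : pvL t ≤ m
      · rw [if_pos ⟨h2t, Or.inl hLm⟩, if_pos ⟨h2t, by omega⟩]
      · rw [if_neg, if_neg]
        · rintro ⟨_, h⟩; omega
        · rintro ⟨_, h | ⟨h, _⟩⟩
          · exact hLm h
          · exact hdv h
  · rw [if_neg (by rintro ⟨h, _⟩; omega), if_neg (by rintro ⟨h, _⟩; omega)]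

lemma pvStepS_desc {n m : Int} (hm : 1 ≤ m) (hmn : m + 1 ≤ n) :
    pvStepS n (pvTab (n + 1).toNat (pvDescS m)) (m + 1)
      = pvTab (n + 1).toNat (pvDescS (m + 1)) := by
  have h0 : (0:Int) ≤ m + 1 := by omega
  have hN : m + 1 < ((n + 1).toNat : Int) := by omega
  unfold pvStepS
  rw [pvTab_get _ _ _ h0 hN]
  have hself : pvDescS m (m + 1) = if pvL (m + 1) ≤ m then pvL (m + 1) else 0 := by
    unfold pvDescS
    by_cases hsm : pvL (m + 1) ≤ m
    · rw [if_pos ⟨by omega, hsm⟩, if_pos hsm]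
    · rw [if_neg (by rintro ⟨_, h⟩; exact hsm h), if_neg hsm]
  rw [hself]
  by_cases hsm : pvL (m + 1) ≤ m
  · have hLa : pvL (m + 1) ≠ 0 := by have := pvL_ge_two (show (2:Int) ≤ m + 1 by omega); omega
    rw [if_neg (by rw [if_pos hsm]; exact hLa)]
    apply pvTab_congr
    intro t ht0 htN
    unfold pvDescS
    by_cases h2t : 2 ≤ t
    · have hLne : pvL t ≠ m + 1 := by
        intro he
        have hp : pvPrime (m + 1) := he ▸ pvL_prime h2t
        have := (pvL_self_iff (show (2:Int) ≤ m + 1 by omega)).mpr hp.2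
        omega
      by_cases hLm : pvL t ≤ m
      · rw [if_pos ⟨h2t, hLm⟩, if_pos ⟨h2t, by omega⟩]
      · rw [if_neg (by rintro ⟨_, h⟩; exact hLm h), if_neg (by rintro ⟨_, h⟩; omega)]
    · rw [if_neg (by rintro ⟨h, _⟩; omega), if_neg (by rintro ⟨h, _⟩; omega)]
  · rw [if_pos (by rw [if_neg hsm])]
    have hstart : pvTab (n + 1).toNat (pvDescS m) = pvTab (n + 1).toNat (pvMidS m (m + 1)) := by
      apply pvTab_congr
      intro t _ _
      unfold pvDescS pvMidS
      have hc : ¬((m + 1) ∣ t ∧ t < m + 1) ∨ ¬(2 ≤ t) := by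
        by_cases h2t : 2 ≤ t
        · left
          rintro ⟨h, h'⟩
          have := Int.le_of_dvd (by omega) h
          omega
        · right; exact h2t
      split_ifs <;> first | rfl | (exfalso; tauto)
    rw [hstart, pvInnerS_loop hm (n + 1 - (m + 1)).toNat (m + 1) rfl dvd_rfl le_rfl]
    apply pvTab_congr
    intro t ht0 htN
    exact pvMidS_top hm hmn (by omega)

lemma pvOuterS_loop {n : Int} : ∀ K : Nat, ∀ m : Int, m.toNat = K → 1 ≤ m → m ≤ n →
    (PySem.List.pyRange 2 (m + 1) 1).foldl (pvStepS n)
        (pvTab (n + 1).toNat (fun _ => 0))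
      = pvTab (n + 1).toNat (pvDescS m) := by
  intro K
  induction K using Nat.strong_induction_on with
  | _ K IH =>
    intro m hK hm1 hmn
    by_cases hbase : m = 1
    · subst hbase
      rw [PySem.List.pyRange_one_eq_nil (by omega)]
      simp only [List.foldl_nil]
      apply pvTab_congr
      intro t _ _
      unfold pvDescS
      rw [if_neg]
      rintro ⟨h2t, hL⟩
      have := pvL_ge_two h2t
      omega
    · rw [show m + 1 = (m - 1 + 1) + 1 by ring,
        PySem.List.pyRange_one_succ_right (by omega), List.foldl_append]
      rw [IH (m - 1).toNat (by omega) (m - 1) rfl (by omega) (by omega)]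
      simp only [List.foldl_cons, List.foldl_nil]
      have hs := pvStepS_desc (n := n) (m := m - 1) (by omega) (by omega)
      rw [show m - 1 + 1 = m by ring] at hs
      rw [show m - 1 + 1 = m by ring]
      exact hs

lemma pvSpf_eq (n : Int) :
    (PySem.List.pyRange 2 (n + 1) 1).foldl (pvStepS n) (PySem.List.pyRepeat [0] (n + 1))
      = pvSpf n := by
  rw [pvRepeat_tab]
  unfold pvSpf
  by_cases hn : n ≤ 1
  · rw [PySem.List.pyRange_one_eq_nil (by omega)]
    simp only [List.foldl_nil]
    apply pvTab_congr
    intro t _ htN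
    rw [if_neg (by omega)]
  · rw [pvOuterS_loop n.toNat n rfl (by omega) le_rfl]
    apply pvTab_congr
    intro t ht0 htN
    unfold pvDescS
    by_cases h2t : 2 ≤ t
    · rw [if_pos ⟨h2t, le_trans (pvL_le h2t) (by omega)⟩, if_pos h2t]
    · rw [if_neg (by rintro ⟨h, _⟩; exact h2t h), if_neg h2t]

lemma pvDict_contains_false {f : PySem.Dict Int Int} {p : Int} (h : p ∉ f.keys) :
    f.contains p = false := by
  rw [← Bool.not_eq_true, PySem.Dict.contains_iff_mem_keys]
  exact h

lemma pvChain_items {n : Int} : ∀ K : Nat, ∀ m : Int, m.toNat = K → 1 ≤ m → m ≤ n →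
    ∀ f : PySem.Dict Int Int, (2 ≤ m → ∀ q ∈ f.keys, q < pvL m) →
    (pvChain (pvSpf n) m f).items = f.items ++ pvF n m := by
  intro K
  induction K using Nat.strong_induction_on with
  | _ K IH =>
    intro m hK hm1 hmn f hf
    by_cases hm2 : 2 ≤ m
    · have h2m : 2 ≤ m := hm2
      have hp : pvPrime (pvL m) := pvL_prime h2m
      have hpd : pvL m ∣ m := pvL_dvd h2m
      have hread : PySem.List.pyGetD (pvSpf n) m 0 = pvL m := by
        unfold pvSpf
        rw [pvTab_get _ _ _ (by omega) (by omega), if_pos h2m]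
      obtain ⟨s1, s2, s3, s4, s5⟩ := pvStrip_spec hp m (by omega)
      have hlt : (pvStrip (pvL m) m).2 < m := s5 hpd
      have hkeys : (pvL m) ∉ f.keys := by
        intro hmem
        have := hf h2m _ hmem
        omega
      rw [pvChain, dif_pos (by omega : 1 < m), hread,
        dif_pos (⟨by omega, hlt⟩ : 0 ≤ (pvStrip (pvL m) m).2 ∧ (pvStrip (pvL m) m).2 < m)]
      have hrec := IH (pvStrip (pvL m) m).2.toNat (by omega) (pvStrip (pvL m) m).2 rfl s1
        (by omega) (f.insert (pvL m) (pvStrip (pvL m) m).1)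
        (by
          intro h2m' q hq
          rw [PySem.Dict.keys_insert_of_not_contains _ _ (pvDict_contains_false hkeys)] at hq
          have hplt : pvL m < pvL (pvStrip (pvL m) m).2 := by
            have hLd : pvL (pvStrip (pvL m) m).2 ∣ (pvStrip (pvL m) m).2 := pvL_dvd h2m'
            have hd2 : pvL (pvStrip (pvL m) m).2 ∣ m := dvd_trans hLd s2
            have hle : pvL m ≤ pvL (pvStrip (pvL m) m).2 :=
              pvL_min h2m (pvL_ge_two h2m') hd2
            have hne : pvL m ≠ pvL (pvStrip (pvL m) m).2 := by
              intro he
              rw [← he] at hLd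
              exact s3 hLd
            omega
          rcases List.mem_append.mp hq with h' | h'
          · have := hf h2m _ h'
            omega
          · rw [List.mem_singleton] at h'
            omega)
      rw [hrec, PySem.Dict.items_insert_of_not_contains _ _ (pvDict_contains_false hkeys)]
      rw [pvF_cons_strip h2m hmn, pvStrip_fst_eq]
      simp [List.append_assoc]
    · have hm : m = 1 := by omega
      subst hm
      rw [pvChain, dif_neg (by omega), pvF_nil_one, List.append_nil]

lemma pvResS_loop {n : Int} (hn : 2 ≤ n) : ∀ K : Nat, ∀ m : Int, m.toNat = K → 1 ≤ m → m ≤ n →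
    (PySem.List.pyRange 2 (m + 1) 1).foldl
        (fun res k => PySem.List.pySetD res k (some (pvChain (pvSpf n) k PySem.Dict.empty)))
        (pvTab (n + 1).toNat (fun _ => none))
      = pvTab (n + 1).toNat
          (fun k => if 2 ≤ k ∧ k ≤ m then some (pvChain (pvSpf n) k PySem.Dict.empty) else none) := by
  intro K
  induction K using Nat.strong_induction_on with
  | _ K IH =>
    intro m hK hm1 hmn
    by_cases hbase : m = 1
    · subst hbase
      rw [PySem.List.pyRange_one_eq_nil (by omega)]
      simp only [List.foldl_nil]
      apply pvTab_congr
      intro t _ _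
      rw [if_neg (by rintro ⟨h1, h2⟩; omega)]
    · rw [show m + 1 = (m - 1 + 1) + 1 by ring,
        PySem.List.pyRange_one_succ_right (by omega), List.foldl_append]
      rw [IH (m - 1).toNat (by omega) (m - 1) rfl (by omega) (by omega)]
      simp only [List.foldl_cons, List.foldl_nil]
      rw [show m - 1 + 1 = m by ring]
      rw [pvTab_set _ _ _ (by omega) (by omega)]
      apply pvTab_congr
      intro t _ _
      by_cases hta : t = m
      · rw [if_pos hta, if_pos (by omega)]
        rw [hta]
      · rw [if_neg hta]
        by_cases hc : 2 ≤ t ∧ t ≤ m - 1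
        · rw [if_pos hc, if_pos ⟨hc.1, by omega⟩]
        · rw [if_neg hc, if_neg (by rintro ⟨h1, h2⟩; exact hc ⟨h1, by omega⟩)]

lemma pvB_eq_pvOut (n : Int) : sieve_prime_factorizations_alt n = pvOut n := by
  unfold sieve_prime_factorizations_alt pvOut
  show ((PySem.List.pyRange 2 (n + 1) 1).foldl
      (fun res k => PySem.List.pySetD res k (some (pvChain
        ((PySem.List.pyRange 2 (n + 1) 1).foldl (pvStepS n) (PySem.List.pyRepeat [0] (n + 1)))
        k PySem.Dict.empty)))
      (PySem.List.pyRepeat [none] (n + 1))).map (Option.map PySem.Dict.items)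
    = pvTab (n + 1).toNat (fun k => if 2 ≤ k then some (pvF n k) else none)
  rw [pvSpf_eq, pvRepeat_tab]
  by_cases hn : n ≤ 1
  · rw [PySem.List.pyRange_one_eq_nil (by omega)]
    simp only [List.foldl_nil]
    rw [pvTab_map]
    apply pvTab_congr
    intro t _ htN
    rw [if_neg (by omega)]
    rfl
  · rw [pvResS_loop (by omega) n.toNat n rfl (by omega) le_rfl, pvTab_map]
    apply pvTab_congr
    intro t ht0 htN
    by_cases h2t : 2 ≤ t
    · rw [if_pos ⟨h2t, by omega⟩, if_pos h2t]
      simp only [Option.map_some]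
      congr 1
      rw [pvChain_items t.toNat t rfl (by omega) (by omega) PySem.Dict.empty
        (by intro _ q hq; simp [PySem.Dict.keys, PySem.Dict.empty] at hq)]
      rfl
    · rw [if_neg (by rintro ⟨h, _⟩; exact h2t h), if_neg h2t]
      rfl

theorem sieve_prime_factorizations_spec : Claim_equal_sieve_prime_factorizations := by
  intro n _
  unfold Spec_sieve_prime_factorizations
  rw [pvA_eq_pvOut, pvB_eq_pvOut]
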